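-- pv_equiv track=rewrite | github.com/jashkarangiya/ai | EPC.py | processed_input
-- ===== SOURCE A (Python) =====
-- special_symbols = ['@', '#', '$', '%', '*']
--
-- def processed_input(text):
--     processed_text = []
--     for char in text.lower():
--         if char.isalnum() or char in special_symbols:
--             processed_text.append(char)
--     processed_text = ''.join(processed_text).replace('j', 'i')
--     if len(processed_text) % 2 != 0:
--         processed_text += 'x'
--     return [processed_text[i:i+2] for i in range(0, len(processed_text), 2)]
-- ===== SOURCE B (Python) =====
-- special_symbols = ['@', '#', '$', '%', '*']
--
-- def processed_input(text):
--     result = []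
--     pending = None
--     for ch in text.lower():
--         if ch.isalnum() or ch in special_symbols:
--             if ch == 'j':
--                 ch = 'i'
--             if pending is None:
--                 pending = ch
--             else:
--                 result.append(pending + ch)
--                 pending = None
--     if pending is not None:
--         result.append(pending + 'x')
--     return result
-- ===== Notes on version B (the rewrite author's own statement) =====
-- stated objective: alternative
-- what changed: Replaces the multi-phase pipeline (collect chars, join into a string, global j->i replace, pad, then slice pairs with a range comprehension) by a single streaming pass that maps j->i per char and emits each completed pair via a one-character pending buffer.
import Mathlib
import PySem

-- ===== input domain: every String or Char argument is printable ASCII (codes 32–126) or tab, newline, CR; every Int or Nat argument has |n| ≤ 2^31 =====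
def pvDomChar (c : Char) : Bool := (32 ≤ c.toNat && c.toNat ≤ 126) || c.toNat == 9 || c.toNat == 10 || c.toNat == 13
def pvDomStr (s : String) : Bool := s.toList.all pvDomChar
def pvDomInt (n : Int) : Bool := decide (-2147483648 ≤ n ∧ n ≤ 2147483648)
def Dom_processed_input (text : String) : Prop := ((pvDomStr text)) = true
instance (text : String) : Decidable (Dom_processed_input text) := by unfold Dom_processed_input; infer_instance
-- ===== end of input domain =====

-- B replaces A's multi-phase pipeline (filter, join, global j->i replace, pad, slice into pairs)
-- by a single streaming pass with a one-character pending buffer (objective: alternative).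

-- ===== PORT A =====
def specialSymbols : List Char := ['@', '#', '$', '%', '*']

def processed_input (text : String) : List String :=
  -- for char in text.lower(): if char.isalnum() or char in special_symbols: append
  let filtered : List Char :=
    (PySem.Str.lower text).toList.foldl
      (fun acc c => if PySem.Chars.isalnum c || specialSymbols.contains c then acc ++ [c] else acc) []
  -- ''.join(processed_text).replace('j', 'i')
  let pt : List Char := PySem.Chars.replace filtered ['j'] ['i']
  -- if len(processed_text) % 2 != 0: processed_text += 'x'
  let pt2 : List Char := if pt.length % 2 ≠ 0 then pt ++ ['x'] else pt
  -- [processed_text[i:i+2] for i in range(0, len(processed_text), 2)]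
  (PySem.List.pyRange 0 (PySem.List.len pt2) 2).map
    (fun i => String.ofList (PySem.List.slice pt2 (some i) (some (i + 2))))

-- ===== PORT B =====
-- the loop body of B: accept a valid char (j mapped to i), pair it with the pending one if any
def pvStep (st : List String × Option Char) (c : Char) : List String × Option Char :=
  if PySem.Chars.isalnum c || specialSymbols.contains c then
    let c' := if c = 'j' then 'i' else c
    match st.2 with
    | none => (st.1, some c')
    | some p => (st.1 ++ [String.ofList [p, c']], none)
  else st

def processed_input_alt (text : String) : List String :=
  let st := (PySem.Str.lower text).toList.foldl pvStep ([], none)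
  match st.2 with
  | none => st.1
  | some p => st.1 ++ [String.ofList [p, 'x']]

-- ===== PRECONDITION & SPEC =====
def Spec_processed_input (text : String) (out : List String) : Prop := out = processed_input_alt text
instance (text : String) (out : List String) : Decidable (Spec_processed_input text out) := by unfold Spec_processed_input; infer_instance

-- ===== CLAIM (what is proved, stated in full; the proofs are below) =====
def Claim_equal_processed_input : Prop := ∀ (text : String), Dom_processed_input text → Spec_processed_input text (processed_input text)

-- ===== LEMMAS AND PROOFS =====

def pvValid (c : Char) : Bool := PySem.Chars.isalnum c || specialSymbols.contains c
def pvJmap (c : Char) : Char := if c = 'j' then 'i' else c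

-- pvStep with the guard and the j-map pulled out
def pvAct (st : List String × Option Char) (c : Char) : List String × Option Char :=
  match st.2 with
  | none => (st.1, some c)
  | some p => (st.1 ++ [String.ofList [p, c]], none)

def pvFinish (st : List String × Option Char) : List String :=
  match st.2 with
  | none => st.1
  | some p => st.1 ++ [String.ofList [p, 'x']]

-- pairing with a trailing-'x' pad, two characters at a time
def pairx : List Char → List String
  | [] => []
  | [a] => [String.ofList [a, 'x']]
  | a :: b :: rest => String.ofList [a, b] :: pairx rest

-- pairing of an even-length list
def chunk2 : List Char → List String
  | a :: b :: rest => String.ofList [a, b] :: chunk2 rest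
  | _ => []

lemma replace_go_singleton (a b : Char) :
    ∀ (fuel : Nat) (l acc : List Char), l.length ≤ fuel →
      PySem.Chars.replace.go [a] [b] fuel l acc
        = acc.reverse ++ l.map (fun c => if c = a then b else c) := by
  intro fuel
  induction fuel with
  | zero =>
    intro l acc h
    have : l = [] := by cases l <;> simp_all
    subst this
    simp [PySem.Chars.replace.go]
  | succ n ih =>
    intro l acc h
    cases l with
    | nil => simp [PySem.Chars.replace.go]
    | cons c t =>
      simp only [List.length_cons] at h
      by_cases hc : c = a
      · subst hc
        have hpre : List.isPrefixOf [c] (c :: t) = true := by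
          simp [List.isPrefixOf]
        rw [PySem.Chars.replace.go, if_pos hpre]
        rw [ih _ _ (by simp; omega)]
        simp
      · have hpre : List.isPrefixOf [a] (c :: t) = false := by
          simp [List.isPrefixOf]
          exact fun h' => hc h'.symm
        rw [PySem.Chars.replace.go, if_neg (by simp [hpre])]
        rw [ih _ _ (by omega)]
        simp [hc]

lemma replace_singleton (a b : Char) (l : List Char) :
    PySem.Chars.replace l [a] [b] = l.map (fun c => if c = a then b else c) := by
  rw [PySem.Chars.replace]
  simp only [List.isEmpty_cons, Bool.false_eq_true, if_false]
  simpa using replace_go_singleton a b l.length l [] le_rfl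

lemma pvStep_eq (st : List String × Option Char) (c : Char) :
    pvStep st c = if pvValid c then pvAct st (pvJmap c) else st := by
  rcases st with ⟨r, op⟩
  by_cases h : pvValid c <;>
    cases op <;>
      simp [pvStep, pvAct, pvValid, pvJmap] at h ⊢ <;> simp [h]

-- B's fold, with the validity guard pulled out into a filter-and-map
lemma foldl_guard (cs : List Char) :
    ∀ st, cs.foldl pvStep st = ((cs.filter pvValid).map pvJmap).foldl pvAct st := by
  induction cs with
  | nil => intro st; simp
  | cons c t ih =>
    intro st
    rw [List.foldl_cons, pvStep_eq]
    by_cases h : pvValid c = true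
    · rw [if_pos h, List.filter_cons, if_pos h, List.map_cons, List.foldl_cons]
      exact ih _
    · rw [if_neg h, List.filter_cons, if_neg h]
      exact ih st

-- the pair machine computes pairx
lemma machine_pairx (L : List Char) :
    (∀ res : List String, pvFinish (L.foldl pvAct (res, none)) = res ++ pairx L) ∧
    (∀ (res : List String) (p : Char),
        pvFinish (L.foldl pvAct (res, some p)) = res ++ pairx (p :: L)) := by
  induction L with
  | nil => exact ⟨fun res => by simp [pvFinish, pairx], fun res p => by simp [pvFinish, pairx]⟩
  | cons c t ih =>
    constructor
    · intro res
      simpa [pvAct, pairx] using ih.2 res c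
    · intro res p
      have := ih.1 (res ++ [String.ofList [p, c]])
      simpa [pvAct, pairx] using this

-- padding then even-pairing is pairx
lemma chunk2_pad (L : List Char) :
    chunk2 (if L.length % 2 ≠ 0 then L ++ ['x'] else L) = pairx L := by
  induction L using pairx.induct with
  | case1 => simp [chunk2, pairx]
  | case2 a => simp [chunk2, pairx]
  | case3 a b rest ih =>
    have hlen : (a :: b :: rest).length % 2 = rest.length % 2 := by
      simp only [List.length_cons]; omega
    by_cases h : rest.length % 2 ≠ 0
    · rw [if_pos (by omega)]
      rw [if_pos h] at ih
      simp only [List.cons_append, chunk2, pairx]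
      rw [ih]
    · rw [if_neg (by omega)]
      rw [if_neg h] at ih
      simp only [chunk2, pairx]
      rw [ih]

-- A's slicing comprehension on an even-length list is chunk2
lemma range_chunk (P : List Char) (h : P.length % 2 = 0) :
    (List.range (P.length / 2)).map (fun k => String.ofList ((P.drop (2 * k)).take 2)) = chunk2 P := by
  induction P using pairx.induct with
  | case1 => simp [chunk2]
  | case2 a => simp at h
  | case3 a b rest ih =>
    have h' : rest.length % 2 = 0 := by
      simp only [List.length_cons] at h; omega
    have hl : (a :: b :: rest).length / 2 = rest.length / 2 + 1 := by
      simp only [List.length_cons]; omega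
    have htail :
        List.map ((fun k => String.ofList ((List.drop (2 * k) (a :: b :: rest)).take 2)) ∘ Nat.succ)
            (List.range (rest.length / 2))
          = List.map (fun k => String.ofList ((List.drop (2 * k) rest).take 2))
            (List.range (rest.length / 2)) := by
      apply List.map_congr_left
      intro k _
      simp only [Function.comp]
      rw [show 2 * Nat.succ k = 2 * k + 1 + 1 by omega]
      simp [List.drop_succ_cons]
    rw [hl, List.range_succ_eq_map, List.map_cons, List.map_map, htail, ih h']
    simp [chunk2]

lemma comprehension_eq_chunk2 (P : List Char) (h : P.length % 2 = 0) :
    (PySem.List.pyRange 0 (PySem.List.len P) 2).map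
      (fun i => String.ofList (PySem.List.slice P (some i) (some (i + 2)))) = chunk2 P := by
  rw [PySem.List.pyRange_of_pos 0 (PySem.List.len P) (by norm_num)]
  simp only [PySem.List.len_eq]
  have hcount : (if (0:Int) < P.length then (((P.length:Int) - 0 + 2 - 1) / 2).toNat else 0)
      = P.length / 2 := by
    by_cases hp : 0 < P.length
    · rw [if_pos (by exact_mod_cast hp)]
      have h1 : ((P.length:Int) - 0 + 2 - 1) = ((P.length + 1 : Nat) : Int) := by push_cast; ring
      rw [h1, show ((2:Int) = ((2:Nat):Int)) from rfl, ← Int.natCast_div, Int.toNat_natCast]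
      omega
    · rw [if_neg (by exact_mod_cast hp)]
      omega
  rw [hcount, ← range_chunk P h, List.map_map]
  apply List.map_congr_left
  intro k _
  have hcast : (0 : Int) + 2 * (k : Int) = ((2 * k : Nat) : Int) := by push_cast; ring
  simp only [Function.comp]
  rw [hcast, show ((2 * k : Nat) : Int) + 2 = ((2 * k : Nat) : Int) + ((2 : Nat) : Int) from rfl,
    PySem.List.slice_natCast_add]

lemma A_eq (text : String) :
    processed_input text
      = chunk2 (if (((PySem.Str.lower text).toList.filter
              (fun c => PySem.Chars.isalnum c || specialSymbols.contains c)).map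
              (fun c => if c = 'j' then 'i' else c)).length % 2 ≠ 0
          then (((PySem.Str.lower text).toList.filter
              (fun c => PySem.Chars.isalnum c || specialSymbols.contains c)).map
              (fun c => if c = 'j' then 'i' else c)) ++ ['x']
          else (((PySem.Str.lower text).toList.filter
              (fun c => PySem.Chars.isalnum c || specialSymbols.contains c)).map
              (fun c => if c = 'j' then 'i' else c))) := by
  simp only [processed_input]
  rw [PySem.List.foldl_append_if_eq_filter
        (fun c => PySem.Chars.isalnum c || specialSymbols.contains c)
        (PySem.Str.lower text).toList [],
      List.nil_append, replace_singleton]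
  set L := ((PySem.Str.lower text).toList.filter
      (fun c => PySem.Chars.isalnum c || specialSymbols.contains c)).map
      (fun c => if c = 'j' then 'i' else c) with hL
  set P := if L.length % 2 ≠ 0 then L ++ ['x'] else L with hP
  have hPe : P.length % 2 = 0 := by
    by_cases h : L.length % 2 ≠ 0
    · rw [hP, if_pos h]; simp; omega
    · rw [hP, if_neg h]; omega
  exact comprehension_eq_chunk2 P hPe

lemma B_eq (text : String) :
    processed_input_alt text
      = pairx (((PySem.Str.lower text).toList.filter pvValid).map pvJmap) := by
  show pvFinish ((PySem.Str.lower text).toList.foldl pvStep ([], none))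
      = pairx (((PySem.Str.lower text).toList.filter pvValid).map pvJmap)
  rw [foldl_guard]
  exact (machine_pairx _).1 []

-- ===== VERDICT (by name: the statement is the Claim_ definition above) =====
theorem processed_input_spec : Claim_equal_processed_input := by
  intro text _
  unfold Spec_processed_input
  rw [A_eq, B_eq, chunk2_pad]
  rfl
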